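-- pv_equiv track=rewrite | github.com/AssassinQuin/hs_analysis | analysis/utils/hero_class.py | hero_card_to_class
-- ===== SOURCE A (Python) =====
-- _HERO_CARD_CLASS = {
--     "HERO_01": "WARRIOR", "HERO_01a": "WARRIOR", "HERO_01b": "WARRIOR",
--     "HERO_01bn": "WARRIOR", "HERO_01n": "WARRIOR", "HERO_01w": "WARRIOR",
--     "HERO_01bp": "WARRIOR", "HERO_01dbp": "WARRIOR",
--     "HERO_02": "SHAMAN",
--     "HERO_03": "ROGUE", "HERO_03a": "ROGUE", "HERO_03az": "ROGUE",
--     "HERO_03b": "ROGUE", "HERO_03e": "ROGUE",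
--     "HERO_03bp": "ROGUE", "HERO_03dbp": "ROGUE", "HERO_03ebp": "ROGUE",
--     "HERO_04": "PALADIN",
--     "HERO_05": "HUNTER", "HERO_05a": "HUNTER", "HERO_05b": "HUNTER",
--     "HERO_05bp": "HUNTER",
--     "HERO_06": "WARLOCK", "HERO_06a": "WARLOCK", "HERO_06bi": "WARLOCK",
--     "HERO_06bp": "WARLOCK", "HERO_06ebp": "WARLOCK",
--     "HERO_07": "MAGE",
--     "HERO_08": "PRIEST",
--     "HERO_09": "DRUID", "HERO_09a": "DRUID",
--     "HERO_10": "DEMONHUNTER", "HERO_10a": "DEMONHUNTER",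
--     "HERO_10ak_Kailene": "DEMONHUNTER", "HERO_10akhp": "DEMONHUNTER",
--     "HERO_10ak": "DEMONHUNTER",
--     "HERO_11": "DEATHKNIGHT", "HERO_11a": "DEATHKNIGHT",
--     "HERO_11aw": "DEATHKNIGHT", "HERO_11awhp": "DEATHKNIGHT",
-- }
--
-- def hero_card_to_class(card_id: str) -> str:
--     if not card_id:
--         return "UNKNOWN"
--     if card_id in _HERO_CARD_CLASS:
--         return _HERO_CARD_CLASS[card_id]
--     for prefix in sorted(_HERO_CARD_CLASS.keys(), key=len, reverse=True):
--         if card_id.startswith(prefix):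
--             return _HERO_CARD_CLASS[prefix]
--     return "UNKNOWN"
-- ===== SOURCE B (Python) =====
-- _CLASS_BY_NUM = {
--     "01": "WARRIOR", "02": "SHAMAN", "03": "ROGUE", "04": "PALADIN",
--     "05": "HUNTER", "06": "WARLOCK", "07": "MAGE", "08": "PRIEST",
--     "09": "DRUID", "10": "DEMONHUNTER", "11": "DEATHKNIGHT",
-- }
--
-- def hero_card_to_class(card_id: str) -> str:
--     # Every hero card id key is "HERO_" + two-digit class number + a variant
--     # suffix, all variants of a number sharing one class, and the bare tag-plus-number
--     # string is always itself a key; so a longest-prefix match is equivalent to reading the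
--     # two-digit class number after the "HERO_" tag.
--     if card_id.startswith("HERO_"):
--         return _CLASS_BY_NUM.get(card_id[5:7], "UNKNOWN")
--     return "UNKNOWN"
-- ===== Notes on version B (the rewrite author's own statement) =====
-- stated objective: simpler
-- what changed: Instead of an exact-match probe of the 38-key dict plus a scan of all keys sorted by length with startswith, B checks the five-character hero tag and looks up the two-digit class number at positions 5-6 in an 11-entry table; this is equivalent because all key variants of one number share a class and the bare tag-plus-number string is always itself a key.
import Mathlib
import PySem

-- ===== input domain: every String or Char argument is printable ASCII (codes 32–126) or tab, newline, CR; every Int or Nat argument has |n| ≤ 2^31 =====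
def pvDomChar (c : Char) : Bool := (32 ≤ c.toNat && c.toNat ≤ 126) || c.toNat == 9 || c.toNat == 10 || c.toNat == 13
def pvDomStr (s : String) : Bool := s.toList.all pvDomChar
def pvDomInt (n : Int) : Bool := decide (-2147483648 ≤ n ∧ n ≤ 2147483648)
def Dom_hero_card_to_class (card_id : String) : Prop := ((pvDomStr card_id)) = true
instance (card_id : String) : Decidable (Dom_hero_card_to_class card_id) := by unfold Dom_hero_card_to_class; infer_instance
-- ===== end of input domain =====

set_option maxRecDepth 8000


-- B replaces A's 38-key exact-match + length-sorted startswith scan by a single lookup of the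
-- two-digit class number card_id[5:7] after checking the "HERO_" tag (objective: simpler).

-- ===== PORT A =====
-- the module-level _HERO_CARD_CLASS dict of A
def heroDict : PySem.Dict String String := PySem.Dict.ofList [
  ("HERO_01", "WARRIOR"), ("HERO_01a", "WARRIOR"), ("HERO_01b", "WARRIOR"),
  ("HERO_01bn", "WARRIOR"), ("HERO_01n", "WARRIOR"), ("HERO_01w", "WARRIOR"),
  ("HERO_01bp", "WARRIOR"), ("HERO_01dbp", "WARRIOR"),
  ("HERO_02", "SHAMAN"),
  ("HERO_03", "ROGUE"), ("HERO_03a", "ROGUE"), ("HERO_03az", "ROGUE"),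
  ("HERO_03b", "ROGUE"), ("HERO_03e", "ROGUE"),
  ("HERO_03bp", "ROGUE"), ("HERO_03dbp", "ROGUE"), ("HERO_03ebp", "ROGUE"),
  ("HERO_04", "PALADIN"),
  ("HERO_05", "HUNTER"), ("HERO_05a", "HUNTER"), ("HERO_05b", "HUNTER"),
  ("HERO_05bp", "HUNTER"),
  ("HERO_06", "WARLOCK"), ("HERO_06a", "WARLOCK"), ("HERO_06bi", "WARLOCK"),
  ("HERO_06bp", "WARLOCK"), ("HERO_06ebp", "WARLOCK"),
  ("HERO_07", "MAGE"),
  ("HERO_08", "PRIEST"),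
  ("HERO_09", "DRUID"), ("HERO_09a", "DRUID"),
  ("HERO_10", "DEMONHUNTER"), ("HERO_10a", "DEMONHUNTER"),
  ("HERO_10ak_Kailene", "DEMONHUNTER"), ("HERO_10akhp", "DEMONHUNTER"),
  ("HERO_10ak", "DEMONHUNTER"),
  ("HERO_11", "DEATHKNIGHT"), ("HERO_11a", "DEATHKNIGHT"),
  ("HERO_11aw", "DEATHKNIGHT"), ("HERO_11awhp", "DEATHKNIGHT")]

-- A's 'for prefix in sorted(...): if card_id.startswith(prefix): return ...' loop
def heroScanA : List String → String → String
  | [], _ => "UNKNOWN"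
  | p :: ps, s =>
    if PySem.Str.startswith s p then heroDict.getD p "UNKNOWN" else heroScanA ps s

def hero_card_to_class (card_id : String) : String :=
  if card_id = "" then "UNKNOWN"
  else if heroDict.contains card_id then heroDict.getD card_id "UNKNOWN"
  else heroScanA (PySem.List.sorted heroDict.keys PySem.Str.len true) card_id

-- ===== PORT B =====
-- B's '_CLASS_BY_NUM' table
def classByNum : PySem.Dict String String := PySem.Dict.ofList [
  ("01", "WARRIOR"), ("02", "SHAMAN"), ("03", "ROGUE"), ("04", "PALADIN"),
  ("05", "HUNTER"), ("06", "WARLOCK"), ("07", "MAGE"), ("08", "PRIEST"),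
  ("09", "DRUID"), ("10", "DEMONHUNTER"), ("11", "DEATHKNIGHT")]

def hero_card_to_class_alt (card_id : String) : String :=
  if PySem.Str.startswith card_id "HERO_" then
    classByNum.getD (PySem.Str.slice card_id (some 5) (some 7)) "UNKNOWN"
  else "UNKNOWN"

-- ===== PRECONDITION & SPEC =====
def Spec_hero_card_to_class (card_id : String) (out : String) : Prop := out = hero_card_to_class_alt card_id
instance (card_id : String) (out : String) : Decidable (Spec_hero_card_to_class card_id out) := by unfold Spec_hero_card_to_class; infer_instance

-- ===== CLAIM (what is proved, stated in full; the proofs are below) =====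
def Claim_equal_hero_card_to_class : Prop := ∀ (card_id : String), Dom_hero_card_to_class card_id → Spec_hero_card_to_class card_id (hero_card_to_class card_id)

-- ===== LEMMAS AND PROOFS =====

-- the class number of a string: chars 5 and 6
def heroNum (s : String) : String := String.ofList ((s.toList.drop 5).take 2)

theorem hero_string_ext {s t : String} (h : s.toList = t.toList) : s = t := by
  have := congrArg String.ofList h
  rwa [String.ofList_toList, String.ofList_toList] at this

-- every key of heroDict: length ≥ 7, starts with "HERO_", value determined by its class number,
-- and its class number is in classByNum
theorem heroKeyFacts : ∀ k ∈ heroDict.keys,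
    7 ≤ k.toList.length ∧ k.toList.take 5 = "HERO_".toList ∧
    heroDict.getD k "UNKNOWN" = classByNum.getD (heroNum k) "UNKNOWN" ∧
    classByNum.contains (heroNum k) = true := by decide

-- every class number maps back to a key "HERO_" ++ n of heroDict, and has length 2
theorem heroNumFacts : ∀ n ∈ classByNum.keys,
    ("HERO_" ++ n) ∈ heroDict.keys ∧ n.toList.length = 2 := by decide

theorem hero_startswith_iff (s p : String) :
    PySem.Str.startswith s p = true ↔ p.toList <+: s.toList := by
  rw [PySem.Str.startswith_eq]
  exact PySem.Chars.startswith_iff _ _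

-- a key matching s forces its class number to be s's and the "HERO_" tag on s
theorem hero_match_shape {s k : String} (hk : k ∈ heroDict.keys)
    (hm : PySem.Str.startswith s k = true) :
    s.toList.take 5 = "HERO_".toList ∧ heroNum k = heroNum s := by
  obtain ⟨hl, hh, -, -⟩ := heroKeyFacts k hk
  have hpre : k.toList = s.toList.take k.toList.length :=
    List.prefix_iff_eq_take.mp ((hero_startswith_iff s k).mp hm)
  constructor
  · rw [← hh, hpre, List.take_take, Nat.min_eq_left (by omega)]
  · unfold heroNum
    congr 1
    rw [hpre, List.drop_take, List.take_take, Nat.min_eq_left (by omega)]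

-- A's scan returns UNKNOWN when nothing matches
theorem heroScanA_none (s : String) : ∀ (L : List String),
    (∀ p ∈ L, PySem.Str.startswith s p = false) → heroScanA L s = "UNKNOWN" := by
  intro L
  induction L with
  | nil => intro _; rfl
  | cons p ps ih =>
    intro h
    unfold heroScanA
    rw [h p (by simp)]
    exact ih (fun q hq => h q (by simp [hq]))

-- A's scan returns v when some element matches and every matching element has value v
theorem heroScanA_const (s v : String) : ∀ (L : List String),
    (∀ p ∈ L, PySem.Str.startswith s p = true → heroDict.getD p "UNKNOWN" = v) →
    (∃ p ∈ L, PySem.Str.startswith s p = true) → heroScanA L s = v := by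
  intro L
  induction L with
  | nil => rintro _ ⟨p, hp, -⟩; exact absurd hp (by simp)
  | cons p ps ih =>
    rintro hval ⟨q, hq, hqm⟩
    unfold heroScanA
    by_cases hp : PySem.Str.startswith s p = true
    · rw [if_pos hp]; exact hval p (by simp) hp
    · rw [if_neg hp]
      rcases List.mem_cons.mp hq with h | h
      · exact absurd (h ▸ hqm) hp
      · exact ih (fun r hr => hval r (by simp [hr])) ⟨q, h, hqm⟩

-- the B-side slice card_id[5:7] is heroNum
theorem hero_slice_eq_num (s : String) :
    PySem.Str.slice s (some 5) (some 7) = heroNum s := by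
  apply hero_string_ext
  rw [PySem.Str.toList_slice, PySem.Chars.slice_eq_listSlice,
    PySem.List.slice_toNat _ (by norm_num) (by norm_num)]
  unfold heroNum
  rw [String.toList_ofList]
  rfl

-- if s's class number is a known one, it has length 2 (so s has ≥ 7 chars of data after drop)
theorem hero_num_len {s : String} (hc : classByNum.contains (heroNum s) = true) :
    7 ≤ s.toList.length := by
  have hk : heroNum s ∈ classByNum.keys := (PySem.Dict.contains_iff_mem_keys _ _).mp hc
  have h2 : (heroNum s).toList.length = 2 := (heroNumFacts _ hk).2
  unfold heroNum at h2
  rw [String.toList_ofList, List.length_take, List.length_drop] at h2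
  omega

-- ===== VERDICT (by name: the statement is the Claim_ definition above) =====
theorem hero_card_to_class_spec : Claim_equal_hero_card_to_class := by
  intro s _
  unfold Spec_hero_card_to_class hero_card_to_class hero_card_to_class_alt
  rw [hero_slice_eq_num]
  by_cases hH : PySem.Str.startswith s "HERO_" = true
  · -- s starts with "HERO_"
    rw [if_pos hH]
    have hspre : "HERO_".toList <+: s.toList := (hero_startswith_iff s _).mp hH
    have hs5 : s.toList.take 5 = "HERO_".toList := by
      have := List.prefix_iff_eq_take.mp hspre
      simpa using this.symm
    have hne : s ≠ "" := by
      intro h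
      subst h
      simp at hs5
    rw [if_neg hne]
    by_cases hc : classByNum.contains (heroNum s) = true
    · -- known class number: some key matches, and every matching key gives that class
      have hlen : 7 ≤ s.toList.length := hero_num_len hc
      have hnk : heroNum s ∈ classByNum.keys := (PySem.Dict.contains_iff_mem_keys _ _).mp hc
      obtain ⟨hk0, hn2⟩ := heroNumFacts _ hnk
      -- the key "HERO_" ++ heroNum s is a prefix of s
      have hk0m : PySem.Str.startswith s ("HERO_" ++ heroNum s) = true := by
        rw [hero_startswith_iff]
        have h7 : s.toList.take 7 = "HERO_".toList ++ (s.toList.drop 5).take 2 := by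
          rw [show (7 : Nat) = 5 + 2 from rfl, List.take_add, hs5]
        have : ("HERO_" ++ heroNum s).toList = s.toList.take 7 := by
          rw [h7, String.toList_append]
          unfold heroNum
          simp [String.toList_ofList]
        rw [this]
        exact List.take_prefix _ _
      have hval : ∀ p ∈ heroDict.keys, PySem.Str.startswith s p = true →
          heroDict.getD p "UNKNOWN" = classByNum.getD (heroNum s) "UNKNOWN" := by
        intro p hp hpm
        obtain ⟨-, -, hv, -⟩ := heroKeyFacts p hp
        rw [hv, (hero_match_shape hp hpm).2]
      by_cases hcs : heroDict.contains s = true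
      · rw [if_pos hcs]
        exact hval s ((PySem.Dict.contains_iff_mem_keys _ _).mp hcs)
          ((hero_startswith_iff s s).mpr (List.prefix_refl _))
      · rw [if_neg hcs]
        apply heroScanA_const
        · intro p hp
          exact hval p ((PySem.List.mem_sorted _ _ _ _).mp hp)
        · exact ⟨"HERO_" ++ heroNum s, (PySem.List.mem_sorted _ _ _ _).mpr hk0, hk0m⟩
    · -- unknown class number: nothing matches
      have hnomatch : ∀ p ∈ heroDict.keys, PySem.Str.startswith s p = false := by
        intro p hp
        by_contra h
        have hpm : PySem.Str.startswith s p = true := by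
          cases hb : PySem.Str.startswith s p with
          | true => rfl
          | false => exact absurd hb h
        obtain ⟨-, -, -, hcp⟩ := heroKeyFacts p hp
        rw [(hero_match_shape hp hpm).2] at hcp
        exact hc hcp
      have hcs : ¬ heroDict.contains s = true := by
        intro h
        have := hnomatch s ((PySem.Dict.contains_iff_mem_keys _ _).mp h)
        rw [(hero_startswith_iff s s).mpr (List.prefix_refl _)] at this
        exact absurd this (by simp)
      rw [if_neg hcs]
      rw [heroScanA_none s _ (fun p hp => hnomatch p ((PySem.List.mem_sorted _ _ _ _).mp hp))]
      have hcfalse : classByNum.contains (heroNum s) = false := by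
        cases hb : classByNum.contains (heroNum s) with
        | true => exact absurd hb hc
        | false => rfl
      rw [PySem.Dict.getD_of_not_contains _ _ hcfalse]
  · -- s does not start with "HERO_": no key can match
    rw [if_neg hH]
    have hnomatch : ∀ p ∈ heroDict.keys, PySem.Str.startswith s p = false := by
      intro p hp
      by_contra h
      have hpm : PySem.Str.startswith s p = true := by
        cases hb : PySem.Str.startswith s p with
        | true => rfl
        | false => exact absurd hb h
      apply hH
      rw [hero_startswith_iff]
      rw [List.prefix_iff_eq_take]
      have := (hero_match_shape hp hpm).1
      simpa using this.symm
    by_cases hne : s = ""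
    · rw [if_pos hne]
    · rw [if_neg hne]
      have hcs : ¬ heroDict.contains s = true := by
        intro h
        have := hnomatch s ((PySem.Dict.contains_iff_mem_keys _ _).mp h)
        rw [(hero_startswith_iff s s).mpr (List.prefix_refl _)] at this
        exact absurd this (by simp)
      rw [if_neg hcs]
      exact heroScanA_none s _ (fun p hp => hnomatch p ((PySem.List.mem_sorted _ _ _ _).mp hp))
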